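-- pv_equiv track=rewrite | github.com/dzno9/utile-job-analyser | providers/gap_matcher.py | _concepts_for_text
-- ===== SOURCE A (Python) =====
-- def _concepts_for_text(text: str, concepts: dict[str, tuple[str, ...]]) -> set[str]:
--     lower = text.lower()
--     matches: set[str] = set()
--     for concept, keywords in concepts.items():
--         for keyword in keywords:
--             if keyword in lower:
--                 matches.add(concept)
--                 break
--     return matches
-- ===== SOURCE B (Python) =====
-- def _concepts_for_text(text: str, concepts: dict[str, tuple[str, ...]]) -> set[str]:
--     # Index every substring of the lowered text whose length is some keyword length,
--     # then decide each keyword by one O(1) set lookup instead of a substring scan.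
--     lower = text.lower()
--     n = len(lower)
--     subs: set[str] = set()
--     for L in {len(k) for kws in concepts.values() for k in kws}:
--         for i in range(n - L + 1):
--             subs.add(lower[i:i + L])
--     return {c for c, kws in concepts.items() if any(k in subs for k in kws)}
-- ===== Notes on version B (the rewrite author's own statement) =====
-- stated objective: faster
-- what changed: Instead of running a substring search over the text for every keyword, B builds once a hash set of all substrings of the lowered text whose length is some keyword length, and decides each keyword by a single set-membership lookup.
import Mathlib
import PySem

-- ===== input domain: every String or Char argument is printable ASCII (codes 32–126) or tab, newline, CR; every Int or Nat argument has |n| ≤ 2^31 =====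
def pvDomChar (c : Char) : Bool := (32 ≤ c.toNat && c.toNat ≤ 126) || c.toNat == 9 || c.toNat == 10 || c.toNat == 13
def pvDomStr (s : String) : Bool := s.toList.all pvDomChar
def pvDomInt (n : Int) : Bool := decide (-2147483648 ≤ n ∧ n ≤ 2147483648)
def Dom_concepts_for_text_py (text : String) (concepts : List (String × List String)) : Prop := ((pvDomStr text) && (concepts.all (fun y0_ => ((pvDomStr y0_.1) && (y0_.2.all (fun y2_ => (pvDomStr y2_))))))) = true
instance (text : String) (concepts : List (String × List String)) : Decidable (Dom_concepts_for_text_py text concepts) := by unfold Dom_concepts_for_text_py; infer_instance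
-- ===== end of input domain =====

-- B replaces the per-keyword substring scan by a set of all text substrings of the keyword lengths,
-- built once, so each keyword is decided by one set-membership lookup (objective: faster; measured faster in a timing run).

-- ===== PORT A =====
-- inner 'for keyword in keywords: if keyword in lower: acc.add(concept); break'
def pvAKwLoop (lower : List Char) (acc : PySem.Set String) (concept : String) : List String → PySem.Set String
  | [] => acc
  | k :: ks => if PySem.Chars.isIn k.toList lower then PySem.Set.add acc concept else pvAKwLoop lower acc concept ks

def concepts_for_text_py (text : String) (concepts : List (String × List String)) : List String :=
  let lower := PySem.Chars.lower text.toList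
  -- the dict parameter: duplicate keys collapse as in Python's dict (last value, first position)
  let items := (PySem.Dict.ofList concepts).items
  items.foldl (fun acc p => pvAKwLoop lower acc p.1 p.2) PySem.Set.empty

-- ===== PORT B =====
def concepts_for_text_py_alt (text : String) (concepts : List (String × List String)) : List String :=
  let lower := PySem.Chars.lower text.toList
  let items := (PySem.Dict.ofList concepts).items
  let n := lower.length
  let lengths := PySem.Set.ofList (items.flatMap (fun p => p.2.map (fun k => k.toList.length)))
  let subs := lengths.foldl (fun s (L : Nat) =>
      (PySem.List.pyRange 0 ((n : Int) - (L : Int) + 1) 1).foldl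
        (fun s i => PySem.Set.add s (PySem.List.slice lower (some i) (some (i + (L : Int))))) s)
    PySem.Set.empty
  items.foldl (fun acc p =>
      if p.2.any (fun k => PySem.Set.contains subs k.toList) then PySem.Set.add acc p.1 else acc)
    PySem.Set.empty

-- ===== PRECONDITION & SPEC =====
def Spec_concepts_for_text_py (text : String) (concepts : List (String × List String)) (out : List String) : Prop := out = concepts_for_text_py_alt text concepts
instance (text : String) (concepts : List (String × List String)) (out : List String) : Decidable (Spec_concepts_for_text_py text concepts out) := by unfold Spec_concepts_for_text_py; infer_instance

-- ===== CLAIM (what is proved, stated in full; the proofs are below) =====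
def Claim_equal_concepts_for_text_py : Prop := ∀ (text : String) (concepts : List (String × List String)), Dom_concepts_for_text_py text concepts → Spec_concepts_for_text_py text concepts (concepts_for_text_py text concepts)

-- ===== LEMMAS AND PROOFS =====


-- subs membership characterization
lemma mem_subsFold (lower : List Char) (lens : List Nat) (s0 : PySem.Set (List Char)) (y : List Char) :
    y ∈ lens.foldl (fun s (L : Nat) =>
        (PySem.List.pyRange 0 ((lower.length : Int) - (L : Int) + 1) 1).foldl
          (fun s i => PySem.Set.add s (PySem.List.slice lower (some i) (some (i + (L : Int))))) s) s0
      ↔ y ∈ s0 ∨ ∃ L ∈ lens, ∃ i ∈ PySem.List.pyRange 0 ((lower.length : Int) - (L : Int) + 1) 1,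
          y = PySem.List.slice lower (some i) (some (i + (L : Int))) := by
  induction lens generalizing s0 with
  | nil =>
    simp only [List.foldl_nil]
    constructor
    · exact Or.inl
    · rintro (h | ⟨L, hL, _⟩)
      · exact h
      · exact absurd hL (List.not_mem_nil)
  | cons L ls ih =>
    simp only [List.foldl_cons, ih, PySem.Set.mem_foldl_add]
    constructor
    · rintro (⟨h | ⟨i, hi, hy⟩⟩ | ⟨M, hM, hex⟩)
      · exact Or.inl h
      · exact Or.inr ⟨L, List.mem_cons_self .., i, hi, hy⟩
      · exact Or.inr ⟨M, List.mem_cons_of_mem _ hM, hex⟩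
    · rintro (h | ⟨M, hM, i, hi, hy⟩)
      · exact Or.inl (Or.inl h)
      · rcases List.mem_cons.mp hM with rfl | hM
        · exact Or.inl (Or.inr ⟨i, hi, hy⟩)
        · exact Or.inr ⟨M, hM, i, hi, hy⟩

lemma slice_iff_infix (lower k : List Char) :
    (∃ i ∈ PySem.List.pyRange 0 ((lower.length : Int) - (k.length : Int) + 1) 1,
        k = PySem.List.slice lower (some i) (some (i + (k.length : Int)))) ↔ k <:+: lower := by
  constructor
  · rintro ⟨i, hi, hk⟩
    rw [PySem.List.mem_pyRange_one] at hi
    rw [PySem.List.slice_toNat _ hi.1 (by omega)] at hk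
    have : (i + (k.length : Int)).toNat - i.toNat = k.length := by omega
    rw [this] at hk
    exact hk ▸ ((List.take_prefix _ _).isInfix.trans (List.drop_suffix _ _).isInfix)
  · rintro ⟨u, v, rfl⟩
    refine ⟨(u.length : Int), ?_, ?_⟩
    · rw [PySem.List.mem_pyRange_one]
      constructor
      · positivity
      · simp [List.length_append]; omega
    · rw [PySem.List.slice_toNat _ (by positivity) (by positivity)]
      have h1 : ((u.length : Int) + (k.length : Int)).toNat - (u.length : Int).toNat = k.length := by omega
      have h2 : ((u.length : Int)).toNat = u.length := by omega
      rw [h1, h2, List.append_assoc, List.drop_left, List.take_left]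

lemma slice_infix (lower : List Char) (L : Nat) (i : Int) (hi : 0 ≤ i) :
    PySem.List.slice lower (some i) (some (i + (L : Int))) <:+: lower := by
  rw [PySem.List.slice_toNat _ hi (by omega)]
  exact (List.take_prefix _ _).isInfix.trans (List.drop_suffix _ _).isInfix

lemma contains_subs_eq_isIn (lower : List Char) (lens : List Nat) (k : List Char)
    (hk : k.length ∈ lens) :
    PySem.Set.contains ((PySem.Set.ofList lens).foldl (fun s (L : Nat) =>
        (PySem.List.pyRange 0 ((lower.length : Int) - (L : Int) + 1) 1).foldl
          (fun s i => PySem.Set.add s (PySem.List.slice lower (some i) (some (i + (L : Int))))) s)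
      PySem.Set.empty) k = PySem.Chars.isIn k lower := by
  rcases h : PySem.Chars.isIn k lower with _ | _
  · rw [PySem.Chars.isIn_eq_false_iff] at h
    rcases hc : PySem.Set.contains _ k with _ | _
    · rfl
    · exfalso
      rw [PySem.Set.contains_iff, mem_subsFold] at hc
      rcases hc with h0 | ⟨L, _, i, hi, hy⟩
      · exact absurd h0 (List.not_mem_nil)
      · rw [PySem.List.mem_pyRange_one] at hi
        exact h (hy ▸ slice_infix lower L i hi.1)
  · rw [PySem.Chars.isIn_iff_infix] at h
    rw [← (slice_iff_infix lower k)] at h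
    rcases h with ⟨i, hi, hy⟩
    rw [PySem.Set.contains_iff, mem_subsFold]
    exact Or.inr ⟨k.length, (PySem.Set.mem_ofList lens k.length).mpr hk, i, hi, hy⟩

lemma pvKwLoop_eq_any (lower : List Char) (subs : PySem.Set (List Char)) (c : String)
    (kws : List String)
    (h : ∀ k ∈ kws, PySem.Set.contains subs k.toList = PySem.Chars.isIn k.toList lower)
    (acc : PySem.Set String) :
    pvAKwLoop lower acc c kws =
      if kws.any (fun k => PySem.Set.contains subs k.toList) then PySem.Set.add acc c else acc := by
  induction kws with
  | nil => rfl
  | cons k ks ih =>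
    have hk := h k (List.mem_cons_self ..)
    simp only [pvAKwLoop, List.any_cons, hk]
    rcases hin : PySem.Chars.isIn k.toList lower with _ | _
    · simp only [Bool.false_or]
      exact ih (fun k' hk' => h k' (List.mem_cons_of_mem _ hk'))
    · simp

theorem concepts_for_text_py_spec : Claim_equal_concepts_for_text_py := by
  intro text concepts _
  unfold Spec_concepts_for_text_py concepts_for_text_py concepts_for_text_py_alt
  dsimp only
  refine PySem.List.foldl_congr_mem _ _ _ _ ?_
  intro acc p hp
  refine pvKwLoop_eq_any _ _ _ _ ?_ acc
  intro k hk
  refine contains_subs_eq_isIn _ _ _ ?_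
  exact List.mem_flatMap.mpr ⟨p, hp, List.mem_map_of_mem hk⟩
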